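-- pv_equiv track=rewrite | github.com/Blueibear/wpgen | wpgen/blueprints/ecommerce_blueprint.py | is_retail_theme
-- ===== SOURCE A (Python) =====
-- RETAIL_KEYWORDS = {
--     # General retail
--     'shop', 'store', 'ecommerce', 'e-commerce', 'online store', 'retail',
--     'marketplace', 'boutique', 'outlet',
--     # Products
--     'product', 'products', 'item', 'items', 'merchandise', 'goods',
--     'catalog', 'catalogue', 'inventory',
--     # Shopping actions
--     'cart', 'checkout', 'buy', 'purchase', 'sell', 'selling',
--     # Apparel/Fashion
--     'shirt', 'shirts', 'tee', 'tees', 't-shirt', 't-shirts',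
--     'apparel', 'clothing', 'clothes', 'fashion', 'wear',
--     'dress', 'dresses', 'pants', 'jeans', 'jacket', 'jackets',
--     'hoodie', 'hoodies', 'sweater', 'sweaters',
--     # Accessories
--     'accessory', 'accessories', 'jewelry', 'jewellery', 'watch', 'watches',
--     # Other retail categories
--     'book', 'books', 'ebook', 'digital downloads',
--     'electronics', 'gadget', 'gadgets', 'device', 'devices',
--     'furniture', 'home decor', 'decoration',
--     'cosmetics', 'beauty', 'makeup',
--     'toy', 'toys', 'game', 'games',
--     'supply', 'supplies', 'equipment',
-- }
--
-- def is_retail_theme(theme_description: str, features: list[str] = None) -> bool: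
--     """Detect if theme description indicates retail/ecommerce intent.
--
--     Args:
--         theme_description: The theme description or requirements text
--         features: Optional list of requested features
--
--     Returns:
--         True if retail keywords detected, False otherwise
--     """
--     if not theme_description:
--         return False
--
--     # Convert to lowercase for case-insensitive matching
--     description_lower = theme_description.lower()
--
--     # Check description
--     for keyword in RETAIL_KEYWORDS:
--         if keyword in description_lower:
--             return True
--
--     # Check features if provided
--     if features:
--         features_str = ' '.join(str(f).lower() for f in features)
--         for keyword in RETAIL_KEYWORDS:
--             if keyword in features_str:
--                 return True
--
--     return False
-- ===== SOURCE B (Python) =====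
-- # One pipe-joined blob split into the keyword list, then bucketed by first
-- # character; matching is a single left-to-right pass over the text trying only
-- # the keywords whose first character equals the current character.
-- _KEYWORDS = (
--     "shop|store|ecommerce|e-commerce|online store|retail|marketplace|boutique|"
--     "outlet|product|products|item|items|merchandise|goods|catalog|catalogue|"
--     "inventory|cart|checkout|buy|purchase|sell|selling|shirt|shirts|tee|tees|"
--     "t-shirt|t-shirts|apparel|clothing|clothes|fashion|wear|dress|dresses|"
--     "pants|jeans|jacket|jackets|hoodie|hoodies|sweater|sweaters|accessory|"
--     "accessories|jewelry|jewellery|watch|watches|book|books|ebook|"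
--     "digital downloads|electronics|gadget|gadgets|device|devices|furniture|"
--     "home decor|decoration|cosmetics|beauty|makeup|toy|toys|game|games|"
--     "supply|supplies|equipment"
-- ).split("|")
--
-- _BUCKETS = {}
-- for _kw in _KEYWORDS:
--     _BUCKETS.setdefault(_kw[0], []).append(_kw)
--
--
-- def _scan(text):
--     for i in range(len(text)):
--         for kw in _BUCKETS.get(text[i], ()):
--             if text.startswith(kw, i):
--                 return True
--     return False
--
--
-- def is_retail_theme(theme_description: str, features: list[str] = None) -> bool:
--     if not theme_description:
--         return False
--     texts = [theme_description.lower()]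
--     if features:
--         texts.append(' '.join(str(f).lower() for f in features))
--     return any(_scan(t) for t in texts)
-- ===== Notes on version B (the rewrite author's own statement) =====
-- stated objective: alternative
-- what changed: A iterates keyword-by-keyword, doing up to 73 whole-text substring scans per text; B makes a single left-to-right pass over the text and at each position tries only the keywords bucketed under that position's first character (buckets built once from a pipe-joined blob), collecting the candidate texts into a list first and applying one scanner over them.
import Mathlib
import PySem

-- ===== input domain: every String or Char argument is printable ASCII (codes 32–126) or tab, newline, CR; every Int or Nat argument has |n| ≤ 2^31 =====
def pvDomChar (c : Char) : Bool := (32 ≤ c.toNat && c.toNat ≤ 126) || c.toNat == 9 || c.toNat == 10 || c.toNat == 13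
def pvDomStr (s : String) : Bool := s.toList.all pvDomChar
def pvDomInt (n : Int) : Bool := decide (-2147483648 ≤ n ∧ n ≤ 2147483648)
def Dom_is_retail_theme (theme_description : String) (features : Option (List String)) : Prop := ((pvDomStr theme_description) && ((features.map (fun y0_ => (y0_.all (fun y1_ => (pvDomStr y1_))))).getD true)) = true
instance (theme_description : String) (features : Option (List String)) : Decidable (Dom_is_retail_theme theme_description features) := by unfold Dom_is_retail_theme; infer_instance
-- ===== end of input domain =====

-- B replaces A's keyword-major loop of 73 whole-text substring scans by one left-to-right
-- pass over the text that, at each position, tries only the keywords bucketed under the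
-- current character (objective: alternative single-pass algorithm; not measured faster).

-- ===== PORT A =====
-- RETAIL_KEYWORDS (a Python set of distinct string literals) in source order;
-- the boolean result does not depend on the set's iteration order.
def retailKeywords : List String :=
  ["shop", "store", "ecommerce", "e-commerce", "online store", "retail",
   "marketplace", "boutique", "outlet",
   "product", "products", "item", "items", "merchandise", "goods",
   "catalog", "catalogue", "inventory",
   "cart", "checkout", "buy", "purchase", "sell", "selling",
   "shirt", "shirts", "tee", "tees", "t-shirt", "t-shirts",
   "apparel", "clothing", "clothes", "fashion", "wear",
   "dress", "dresses", "pants", "jeans", "jacket", "jackets",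
   "hoodie", "hoodies", "sweater", "sweaters",
   "accessory", "accessories", "jewelry", "jewellery", "watch", "watches",
   "book", "books", "ebook", "digital downloads",
   "electronics", "gadget", "gadgets", "device", "devices",
   "furniture", "home decor", "decoration",
   "cosmetics", "beauty", "makeup",
   "toy", "toys", "game", "games",
   "supply", "supplies", "equipment"]

-- 'for keyword in RETAIL_KEYWORDS: if keyword in text: return True' / 'return False'
def kwSearchA : List String → List Char → Bool
  | [], _ => false
  | k :: rest, text => if PySem.Chars.isIn k.toList text then true else kwSearchA rest text

-- ' '.join(str(f).lower() for f in features)  (str(f) is the identity: f is a str)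
def joinLowerFeatures (fs : List String) : List Char :=
  PySem.Chars.join [' '] (fs.map (fun f => PySem.Chars.lower f.toList))

def is_retail_theme (theme_description : String) (features : Option (List String)) : Bool :=
  if theme_description.toList = [] then false
  else if kwSearchA retailKeywords (PySem.Chars.lower theme_description.toList) then true
  else
    match features with
    | some fs => if fs = [] then false else kwSearchA retailKeywords (joinLowerFeatures fs)
    | none => false

-- ===== PORT B =====
-- the module-level blob: "shop|store|…".split("|")
def kwBlob : String :=
  "shop|store|ecommerce|e-commerce|online store|retail|marketplace|boutique|outlet|product|products|item|items|merchandise|goods|catalog|catalogue|inventory|cart|checkout|buy|purchase|sell|selling|shirt|shirts|tee|tees|t-shirt|t-shirts|apparel|clothing|clothes|fashion|wear|dress|dresses|pants|jeans|jacket|jackets|hoodie|hoodies|sweater|sweaters|accessory|accessories|jewelry|jewellery|watch|watches|book|books|ebook|digital downloads|electronics|gadget|gadgets|device|devices|furniture|home decor|decoration|cosmetics|beauty|makeup|toy|toys|game|games|supply|supplies|equipment"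

def keywordsB : List (List Char) := PySem.Chars.splitOn kwBlob.toList ['|']

-- the module-level loop building _BUCKETS (kw[0] is the head of a nonempty keyword)
def bucketsB : PySem.Dict Char (List (List Char)) :=
  keywordsB.foldl (fun d kw =>
    match kw with
    | [] => d
    | c :: _ => d.insert c (d.getD c [] ++ [kw])) PySem.Dict.empty

-- _scan: one pass over the positions of text; the inner
-- 'for kw in _BUCKETS.get(text[i], ()): if text.startswith(kw, i): return True' is .any;
-- text.startswith(kw, i) (0 ≤ i < len) is: kw is a prefix of the i-th suffix.
def scanB (bk : PySem.Dict Char (List (List Char))) : List Char → Bool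
  | [] => false
  | c :: rest =>
    if (bk.getD c []).any (fun kw => PySem.Chars.startswith (c :: rest) kw) then true
    else scanB bk rest

def is_retail_theme_alt (theme_description : String) (features : Option (List String)) : Bool :=
  if theme_description.toList = [] then false
  else
    let texts := [PySem.Chars.lower theme_description.toList] ++
      (match features with
       | some fs => if fs = [] then [] else [joinLowerFeatures fs]
       | none => [])
    texts.any (scanB bucketsB)

-- ===== PRECONDITION & SPEC =====
def Spec_is_retail_theme (theme_description : String) (features : Option (List String)) (out : Bool) : Prop := out = is_retail_theme_alt theme_description features
instance (theme_description : String) (features : Option (List String)) (out : Bool) : Decidable (Spec_is_retail_theme theme_description features out) := by unfold Spec_is_retail_theme; infer_instance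

-- ===== CLAIM (what is proved, stated in full; the proofs are below) =====
def Claim_equal_is_retail_theme : Prop := ∀ (theme_description : String) (features : Option (List String)), Dom_is_retail_theme theme_description features → Spec_is_retail_theme theme_description features (is_retail_theme theme_description features)

-- ===== LEMMAS AND PROOFS =====

set_option maxRecDepth 40000 in
set_option maxHeartbeats 2000000 in
lemma keywordsB_eq : keywordsB = retailKeywords.map String.toList := by decide

lemma kwSearchA_eq_any (kws : List String) (t : List Char) :
    kwSearchA kws t = kws.any (fun k => PySem.Chars.isIn k.toList t) := by
  induction kws with
  | nil => rfl
  | cons k rest ih => simp [kwSearchA, ih]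

lemma buckets_getD (kws : List (List Char)) (d : PySem.Dict Char (List (List Char))) (c : Char) :
    (kws.foldl (fun d kw =>
      match kw with
      | [] => d
      | a :: _ => d.insert a (d.getD a [] ++ [kw])) d).getD c [] =
    d.getD c [] ++ kws.filter (fun kw => kw.head? == some c) := by
  induction kws generalizing d with
  | nil => simp
  | cons kw rest ih =>
    simp only [List.foldl_cons, List.filter_cons]
    cases h : kw with
    | nil => simp [ih]
    | cons a t =>
      rw [ih]
      by_cases hc : c = a
      · subst hc; simp
      · rw [PySem.Dict.getD_insert, if_neg hc]
        simp [Ne.symm hc]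

lemma bucketsB_getD (c : Char) :
    bucketsB.getD c [] =
      (retailKeywords.map String.toList).filter (fun kw => kw.head? == some c) := by
  have := buckets_getD keywordsB PySem.Dict.empty c
  simpa [bucketsB, keywordsB_eq, PySem.Dict.getD_empty] using this

lemma retailKeywords_ne_nil : ∀ kw ∈ retailKeywords, kw.toList ≠ [] := by decide

lemma bucket_any_eq (c : Char) (rest : List Char) :
    (bucketsB.getD c []).any (fun kw => PySem.Chars.startswith (c :: rest) kw)
      = retailKeywords.any (fun kw => PySem.Chars.startswith (c :: rest) kw.toList) := by
  rw [bucketsB_getD, List.any_filter, List.any_map]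
  rw [Bool.eq_iff_iff, List.any_eq_true, List.any_eq_true]
  constructor
  · rintro ⟨kw, hkw, hcond⟩
    simp only [Function.comp] at hcond
    rw [Bool.and_eq_true] at hcond
    exact ⟨kw, hkw, hcond.2⟩
  · rintro ⟨kw, hkw, hs⟩
    refine ⟨kw, hkw, ?_⟩
    have hpre := (PySem.Chars.startswith_iff _ _).1 hs
    cases h : kw.toList with
    | nil => exact absurd h (retailKeywords_ne_nil kw hkw)
    | cons a t =>
      rw [h] at hpre
      obtain ⟨s, hsapp⟩ := hpre
      simp only [List.cons_append] at hsapp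
      injection hsapp with h1 _
      subst h1
      rw [h] at hs
      simp [Function.comp, h, hs]

lemma scan_iff (t : List Char) :
    scanB bucketsB t = true ↔ ∃ kw ∈ retailKeywords, kw.toList <:+: t := by
  induction t with
  | nil =>
    constructor
    · intro h; simp [scanB] at h
    · rintro ⟨kw, hkw, hinf⟩
      exact absurd (List.infix_nil.1 hinf) (retailKeywords_ne_nil kw hkw)
  | cons c rest ih =>
    simp only [scanB]
    rw [bucket_any_eq]
    by_cases h : retailKeywords.any (fun kw => PySem.Chars.startswith (c :: rest) kw.toList) = true
    · rw [if_pos h]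
      obtain ⟨kw, hkw, hs⟩ := List.any_eq_true.1 h
      exact iff_of_true rfl ⟨kw, hkw, ((PySem.Chars.startswith_iff _ _).1 hs).isInfix⟩
    · rw [if_neg h, ih]
      constructor
      · rintro ⟨kw, hkw, hinf⟩; exact ⟨kw, hkw, List.infix_cons_iff.2 (Or.inr hinf)⟩
      · rintro ⟨kw, hkw, hinf⟩
        rcases List.infix_cons_iff.1 hinf with hpre | hinf'
        · exact absurd (List.any_eq_true.2 ⟨kw, hkw, (PySem.Chars.startswith_iff _ _).2 hpre⟩) h
        · exact ⟨kw, hkw, hinf'⟩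

lemma scan_eq_kwSearchA (t : List Char) :
    scanB bucketsB t = kwSearchA retailKeywords t := by
  rw [kwSearchA_eq_any]
  rw [Bool.eq_iff_iff]
  rw [scan_iff, List.any_eq_true]
  constructor
  · rintro ⟨kw, hkw, hinf⟩; exact ⟨kw, hkw, (PySem.Chars.isIn_iff_infix _ _).2 hinf⟩
  · rintro ⟨kw, hkw, hin⟩; exact ⟨kw, hkw, (PySem.Chars.isIn_iff_infix _ _).1 hin⟩

-- ===== VERDICT (by name: the statement is the Claim_ definition above) =====
theorem is_retail_theme_spec : Claim_equal_is_retail_theme := by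
  intro d f _
  unfold Spec_is_retail_theme
  unfold is_retail_theme is_retail_theme_alt
  by_cases hd : d.toList = []
  · simp [hd]
  · rw [if_neg hd, if_neg hd]
    cases f with
    | none => simp [scan_eq_kwSearchA]
    | some fs =>
      by_cases hfs : fs = [] <;>
        simp [hfs, scan_eq_kwSearchA, List.any_cons]
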